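-- pv_equiv track=rewrite | github.com/mabahgat/cohort_analysis | extract_examples.py | switch_key_value
-- ===== SOURCE A (Python) =====
-- def switch_key_value(org_map):
--     """
--     Switch key-value into a new map, accounting for duplicates in values
--     :param org_map:
--     :return:
--     """
--     switched_map = {}
--     for label in org_map.keys():
--         for word in org_map[label]:
--             if word in switched_map:
--                 switched_map[word] = switched_map[word] + '-' + label
--             else:
--                 switched_map[word] = label
--     return switched_map
-- ===== SOURCE B (Python) =====
-- def switch_key_value(org_map):
--     """
--     Switch key-value into a new map, accounting for duplicates in values.
--     Flatten-and-comprehend: flatten the map once into (word, label) pairs,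
--     then build the result in a single dict comprehension whose value for each
--     word is '-'.join of all that word's labels scanned from the pair list
--     (re-insertions of a duplicate word rewrite the same value, so first-seen
--     order is kept).
--     """
--     pairs = [(word, label) for label, words in org_map.items() for word in words]
--     return {word: '-'.join(l for w, l in pairs if w == word) for word, _ in pairs}
-- ===== Notes on version B (the rewrite author's own statement) =====
-- stated objective: alternative
-- what changed: Replaces the incremental dict with membership-check-and-update by a flatten-then-comprehend scheme: one flattening pass makes a (word, label) pair list, then a dict comprehension computes each word's full '-'-joined label string from a scan of that pair list, with no intermediate dict values ever updated.
import Mathlib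
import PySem

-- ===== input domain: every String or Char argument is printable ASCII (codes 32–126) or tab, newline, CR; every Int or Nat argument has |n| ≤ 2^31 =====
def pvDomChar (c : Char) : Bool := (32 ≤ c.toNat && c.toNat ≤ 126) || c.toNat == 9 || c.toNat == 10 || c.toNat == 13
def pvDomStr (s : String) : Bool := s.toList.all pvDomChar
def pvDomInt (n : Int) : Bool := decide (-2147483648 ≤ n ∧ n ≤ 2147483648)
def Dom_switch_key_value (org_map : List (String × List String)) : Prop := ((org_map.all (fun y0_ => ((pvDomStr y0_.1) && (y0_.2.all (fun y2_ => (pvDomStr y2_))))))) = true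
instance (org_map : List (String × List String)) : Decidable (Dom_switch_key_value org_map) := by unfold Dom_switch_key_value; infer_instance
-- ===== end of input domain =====

-- B replaces A's incremental membership-check-and-update dict loop by flatten-then-comprehend:
-- flatten to (word,label) pairs once, then compute each word's joined label string by a scan of
-- that pair list; objective: alternative (no dict value is ever updated; not claimed faster).

-- ===== PORT A =====
-- one iteration of A's inner loop body
def pvStepA (label : String) (d : PySem.Dict String String) (w : String) : PySem.Dict String String :=
  if d.contains w then d.insert w (d.getD w "" ++ "-" ++ label) else d.insert w label

def switch_key_value (org_map : List (String × List String)) : List (String × String) :=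
  (org_map.foldl (fun d p => p.2.foldl (pvStepA p.1) d) PySem.Dict.empty).items

-- ===== PORT B =====
-- pairs = [(word, label) for label, words in org_map.items() for word in words]
def pvPairs (org_map : List (String × List String)) : List (String × String) :=
  org_map.flatMap (fun p => p.2.map (fun w => (w, p.1)))

-- '-'.join(l for w, l in pairs if w == word)
def pvJoinFor (pairs : List (String × String)) (word : String) : String :=
  PySem.Str.join "-" ((pairs.filter (fun r => r.1 == word)).map Prod.snd)

-- the dict comprehension: insert (word, joined value) for each pair, in order
def switch_key_value_alt (org_map : List (String × List String)) : List (String × String) :=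
  (let pairs := pvPairs org_map
   pairs.foldl (fun d q => d.insert q.1 (pvJoinFor pairs q.1)) PySem.Dict.empty).items

-- ===== PRECONDITION & SPEC =====
def Spec_switch_key_value (org_map : List (String × List String)) (out : List (String × String)) : Prop :=
  out = switch_key_value_alt org_map
instance (org_map : List (String × List String)) (out : List (String × String)) : Decidable (Spec_switch_key_value org_map out) := by
  unfold Spec_switch_key_value; infer_instance

-- ===== CLAIM (what is proved, stated in full; the proofs are below) =====
def Claim_equal_switch_key_value : Prop := ∀ (org_map : List (String × List String)), Dom_switch_key_value org_map → Spec_switch_key_value org_map (switch_key_value org_map)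

-- ===== LEMMAS AND PROOFS =====

-- first occurrences of each distinct element, in order (fold with a seen-accumulator)
def pvFirsts (l : List String) : List String :=
  l.foldl (fun acc x => if x ∈ acc then acc else acc ++ [x]) []

theorem pv_firsts_go_mem (l acc : List String) (x : String) :
    x ∈ l.foldl (fun acc x => if x ∈ acc then acc else acc ++ [x]) acc ↔ x ∈ acc ∨ x ∈ l := by
  induction l generalizing acc with
  | nil => simp
  | cons a t ih =>
    rw [List.foldl_cons, ih]
    by_cases ha : a ∈ acc
    · simp only [if_pos ha, List.mem_cons]
      constructor
      · rintro (h | h) <;> tauto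
      · rintro (h | rfl | h) <;> tauto
    · simp only [if_neg ha, List.mem_append, List.mem_singleton, List.mem_cons]
      tauto

theorem pv_mem_firsts (l : List String) (x : String) : x ∈ pvFirsts l ↔ x ∈ l := by
  unfold pvFirsts; rw [pv_firsts_go_mem]; simp

theorem pv_firsts_go_nodup (l acc : List String) (h : acc.Nodup) :
    (l.foldl (fun acc x => if x ∈ acc then acc else acc ++ [x]) acc).Nodup := by
  induction l generalizing acc with
  | nil => exact h
  | cons a t ih =>
    rw [List.foldl_cons]
    by_cases ha : a ∈ acc
    · rw [if_pos ha]; exact ih acc h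
    · rw [if_neg ha]
      refine ih _ ?_
      simp [List.nodup_append, h]
      exact fun b hb hba => ha (hba ▸ hb)

theorem pv_firsts_nodup (l : List String) : (pvFirsts l).Nodup :=
  pv_firsts_go_nodup l [] List.nodup_nil

theorem pv_firsts_snoc (l : List String) (w : String) :
    pvFirsts (l ++ [w]) = if w ∈ l then pvFirsts l else pvFirsts l ++ [w] := by
  unfold pvFirsts
  rw [List.foldl_append, List.foldl_cons, List.foldl_nil]
  have : w ∈ l.foldl (fun acc x => if x ∈ acc then acc else acc ++ [x]) [] ↔ w ∈ l := by
    rw [pv_firsts_go_mem]; simp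
  by_cases hm : w ∈ l
  · rw [if_pos (this.mpr hm), if_pos hm]
  · rw [if_neg (fun hc => hm (this.mp hc)), if_neg hm]

-- '-'.join on char lists: prepending one more part, and appending a last part
theorem pv_chars_join_cons (sep x : List Char) (t : List (List Char)) (h : t ≠ []) :
    PySem.Chars.join sep (x :: t) = x ++ sep ++ PySem.Chars.join sep t := by
  cases t with
  | nil => exact absurd rfl h
  | cons y u => exact PySem.Chars.join_cons_cons sep x y u

theorem pv_chars_join_snoc (sep q : List Char) (ps : List (List Char)) (h : ps ≠ []) :
    PySem.Chars.join sep (ps ++ [q]) = PySem.Chars.join sep ps ++ sep ++ q := by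
  induction ps with
  | nil => exact absurd rfl h
  | cons x t ih =>
    cases t with
    | nil =>
      simp [PySem.Chars.join_cons_cons, PySem.Chars.join_singleton]
    | cons y u =>
      rw [List.cons_append, pv_chars_join_cons sep x _ (by simp),
          pv_chars_join_cons sep x (y :: u) (by simp), ih (by simp)]
      simp [List.append_assoc]

theorem pv_join_single (l : String) : PySem.Str.join "-" [l] = l := by
  simp [PySem.Str.join, PySem.Chars.join_singleton, String.ofList_toList]

theorem pv_join_snoc (ls : List String) (l : String) (h : ls ≠ []) :
    PySem.Str.join "-" (ls ++ [l]) = PySem.Str.join "-" ls ++ "-" ++ l := by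
  simp only [PySem.Str.join, List.map_append, List.map_cons, List.map_nil]
  rw [pv_chars_join_snoc _ _ _ (by simpa using h), String.ofList_append, String.ofList_append,
      String.ofList_toList, String.ofList_toList]

-- filter of a pair list by key, at a snoc
theorem pv_filter_snoc (qs : List (String × String)) (q : (String × String)) (w : String) :
    (qs ++ [q]).filter (fun r => r.1 == w)
      = qs.filter (fun r => r.1 == w) ++ if q.1 == w then [q] else [] := by
  simp only [List.filter_append, List.filter_cons, List.filter_nil]

theorem pv_filter_nil_of_not_mem (qs : List (String × String)) (w : String)
    (h : w ∉ qs.map Prod.fst) : qs.filter (fun r => r.1 == w) = [] := by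
  rw [List.filter_eq_nil_iff]
  intro r hr hrw
  exact h (List.mem_map.mpr ⟨r, hr, by simpa using hrw⟩)

theorem pv_filter_ne_nil_of_mem (qs : List (String × String)) (w : String)
    (h : w ∈ qs.map Prod.fst) : qs.filter (fun r => r.1 == w) ≠ [] := by
  obtain ⟨r, hr, hrw⟩ := List.mem_map.mp h
  intro hnil
  have : r ∈ qs.filter (fun r => r.1 == w) := by
    rw [List.mem_filter]; exact ⟨hr, by simp [hrw]⟩
  simp [hnil] at this

-- pvJoinFor at a snoc of the pair list
theorem pv_joinFor_snoc_self (qs : List (String × String)) (q : (String × String))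
    (h : q.1 ∈ qs.map Prod.fst) :
    pvJoinFor (qs ++ [q]) q.1 = pvJoinFor qs q.1 ++ "-" ++ q.2 := by
  unfold pvJoinFor
  rw [pv_filter_snoc, if_pos (by simp), List.map_append]
  exact pv_join_snoc _ _ (by simpa using pv_filter_ne_nil_of_mem qs q.1 h)

theorem pv_joinFor_snoc_other (qs : List (String × String)) (q : (String × String))
    (w : String) (h : q.1 ≠ w) : pvJoinFor (qs ++ [q]) w = pvJoinFor qs w := by
  unfold pvJoinFor
  rw [pv_filter_snoc, if_neg (by simpa using h)]
  simp

theorem pv_joinFor_fresh (qs : List (String × String)) (q : (String × String))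
    (h : q.1 ∉ qs.map Prod.fst) : pvJoinFor (qs ++ [q]) q.1 = q.2 := by
  unfold pvJoinFor
  rw [pv_filter_snoc, if_pos (by simp), pv_filter_nil_of_not_mem qs q.1 h]
  simp [pv_join_single]

-- the canonical value of both folds over a pair list
def pvF (ps : List (String × String)) : List (String × String) :=
  (pvFirsts (ps.map Prod.fst)).map (fun w => (w, pvJoinFor ps w))

-- A's nested fold equals the fold of pvStepA over the flattened pair list
theorem pv_A_flatten (l : List (String × List String)) (e : PySem.Dict String String) :
    l.foldl (fun d p => p.2.foldl (pvStepA p.1) d) e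
      = (pvPairs l).foldl (fun d q => pvStepA q.2 d q.1) e := by
  induction l generalizing e with
  | nil => rfl
  | cons p t ih =>
    simp only [List.foldl_cons, pvPairs, List.flatMap_cons, List.foldl_append, List.foldl_map]
    exact ih _

-- invariant for A's fold: items are the canonical list of the processed prefix
theorem pv_A_items (ps : List (String × String)) :
    (ps.foldl (fun d q => pvStepA q.2 d q.1) PySem.Dict.empty).items = pvF ps := by
  induction ps using List.reverseRecOn with
  | nil => simp [pvF, pvFirsts, PySem.Dict.empty]
  | append_singleton qs q ih =>
    rw [List.foldl_append, List.foldl_cons, List.foldl_nil]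
    set d := qs.foldl (fun d q => pvStepA q.2 d q.1) PySem.Dict.empty with hd
    have hkeys : d.keys = pvFirsts (qs.map Prod.fst) := by
      simp only [PySem.Dict.keys, ih, pvF, List.map_map]
      rw [show ((fun x : String × String => x.1) ∘ fun w => (w, pvJoinFor qs w)) = id from rfl,
        List.map_id]
    have hknd : d.keys.Nodup := hkeys ▸ pv_firsts_nodup _
    have hcont : d.contains q.1 = decide (q.1 ∈ qs.map Prod.fst) := by
      rw [PySem.Dict.contains_eq_decide_mem_keys, hkeys]
      simp [pv_mem_firsts]
    by_cases hm : q.1 ∈ qs.map Prod.fst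
    · have hc : d.contains q.1 = true := by simp [hcont, hm]
      have hget : d.getD q.1 "" = pvJoinFor qs q.1 := by
        refine PySem.Dict.getD_of_mem_items d ?_ hknd ""
        rw [ih]
        exact List.mem_map_of_mem ((pv_mem_firsts _ _).mpr hm)
      rw [pvStepA, if_pos hc, PySem.Dict.items_insert_of_contains d _ hc, ih]
      unfold pvF
      simp only [List.map_append, List.map_cons, List.map_nil]
      rw [pv_firsts_snoc, if_pos hm, List.map_map]
      refine List.map_congr_left (fun w hw => ?_)
      by_cases hwq : w = q.1
      · subst hwq
        simp only [Function.comp, BEq.rfl, if_pos]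
        rw [hget, pv_joinFor_snoc_self qs q hm]
      · have : (w == q.1) = false := by simp [hwq]
        simp only [Function.comp, this, if_neg, Bool.false_eq_true, not_false_iff]
        rw [pv_joinFor_snoc_other qs q w (fun h => hwq h.symm)]
    · have hc : d.contains q.1 = false := by simp [hcont, hm]
      rw [pvStepA, if_neg (by simp [hc]), PySem.Dict.items_insert_of_not_contains d _ hc, ih]
      unfold pvF
      simp only [List.map_append, List.map_cons, List.map_nil]
      rw [pv_firsts_snoc, if_neg hm, List.map_append]
      congr 1
      · refine List.map_congr_left (fun w hw => ?_)
        have hwm : w ∈ qs.map Prod.fst := (pv_mem_firsts _ _).mp hw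
        have hwq : q.1 ≠ w := fun h => hm (h ▸ hwm)
        rw [pv_joinFor_snoc_other qs q w hwq]
      · simp [pv_joinFor_fresh qs q hm]

-- B's fold of constant-valued inserts over ps lists the first occurrences with their values
theorem pv_B_items (v : String → String) (ps : List (String × String)) :
    (ps.foldl (fun d q => d.insert q.1 (v q.1)) PySem.Dict.empty).items
      = (pvFirsts (ps.map Prod.fst)).map (fun w => (w, v w)) := by
  induction ps using List.reverseRecOn with
  | nil => simp [pvFirsts, PySem.Dict.empty]
  | append_singleton qs q ih =>
    rw [List.foldl_append, List.foldl_cons, List.foldl_nil]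
    set d := qs.foldl (fun d q => d.insert q.1 (v q.1)) PySem.Dict.empty with hd
    have hcont : d.contains q.1 = decide (q.1 ∈ qs.map Prod.fst) := by
      rw [PySem.Dict.contains_eq_decide_mem_keys]
      have : d.keys = pvFirsts (qs.map Prod.fst) := by
        simp only [PySem.Dict.keys, ih, List.map_map]
        rw [show ((fun x : String × String => x.1) ∘ fun w => (w, v w)) = id from rfl,
          List.map_id]
      rw [this]; simp [pv_mem_firsts]
    simp only [List.map_append, List.map_cons, List.map_nil]
    rw [pv_firsts_snoc]
    by_cases hm : q.1 ∈ qs.map Prod.fst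
    · have hc : d.contains q.1 = true := by simp [hcont, hm]
      rw [PySem.Dict.items_insert_of_contains d _ hc, ih, if_pos hm, List.map_map]
      refine List.map_congr_left (fun w hw => ?_)
      by_cases hwq : w = q.1
      · subst hwq; simp [Function.comp]
      · have : (w == q.1) = false := by simp [hwq]
        simp [Function.comp, this]
    · have hc : d.contains q.1 = false := by simp [hcont, hm]
      rw [PySem.Dict.items_insert_of_not_contains d _ hc, ih, if_neg hm, List.map_append]
      simp

-- ===== VERDICT (by name: the statement is the Claim_ definition above) =====
theorem switch_key_value_spec : Claim_equal_switch_key_value := by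
  intro org_map _
  unfold Spec_switch_key_value switch_key_value switch_key_value_alt
  rw [pv_A_flatten, pv_A_items, pv_B_items]
  rfl
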